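-- pv_equiv track=rewrite | github.com/tsuchi0410/AtCoder | problems/ABC/ABC276/C.py | f
-- ===== SOURCE A (Python) =====
-- import math
--
-- def f(num):
--     l = list(range(101))
--     l = l[1:]
--     aa = 0
--     for i in range(100):
--         if l[i] == num:
--             return aa
--         else:
--             aa += math.factorial(i)
-- ===== SOURCE B (Python) =====
-- import math
--
-- # Precompute once: answer table n -> 0! + 1! + ... + (n-2)!, with the factorial
-- # maintained incrementally (no math.factorial calls); f is then a single dict lookup.
-- _TABLE = {}
-- _acc = 0
-- _fact = 1
-- for _k in range(1, 101):
--     _TABLE[_k] = _acc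
--     _acc += _fact
--     _fact *= _k
--
-- def f(num):
--     return _TABLE.get(num)
-- ===== Notes on version B (the rewrite author's own statement) =====
-- stated objective: alternative
-- what changed: Replaces A's per-call 101-element list build and linear scan calling math.factorial at each step by a module-level table of the 100 answers built once with an incrementally maintained factorial; f becomes a single dict lookup that returns None outside 1..100 exactly like A (Pre_ excludes those inputs since None is not an int).
-- outside the precondition, e.g. on f(0): A returns None, B returns None; on f(101): A returns None, B returns None
import Mathlib
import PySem

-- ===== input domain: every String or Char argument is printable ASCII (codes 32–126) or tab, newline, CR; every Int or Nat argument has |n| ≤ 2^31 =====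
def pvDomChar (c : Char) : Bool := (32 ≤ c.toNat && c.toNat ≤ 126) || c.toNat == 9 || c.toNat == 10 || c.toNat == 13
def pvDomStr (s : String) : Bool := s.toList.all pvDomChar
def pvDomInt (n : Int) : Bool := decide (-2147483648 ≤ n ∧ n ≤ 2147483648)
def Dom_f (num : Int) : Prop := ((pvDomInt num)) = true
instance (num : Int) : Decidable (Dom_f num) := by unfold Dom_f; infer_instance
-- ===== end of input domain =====

-- B replaces A's per-call scan with a precomputed answer table (factorial maintained
-- incrementally) and a single dict lookup; same values on 1..100.

-- ===== PORT A =====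
-- math.factorial
def pyFact : Nat → Int
  | 0 => 1
  | n + 1 => (n + 1 : Int) * pyFact n

-- A's loop over i in range(100): l[i] = i+1; early return aa, else aa += factorial(i).
-- Outside Pre_ (num not in 1..100) Python A returns None; the port's fall-through value 0 is unclaimed there.
def fLoop (num : Int) : Nat → Int → Int
  | 0, _ => 0
  | steps + 1, aa =>
    let i : Nat := 100 - (steps + 1)
    if ((i : Int) + 1) = num then aa
    else fLoop num steps (aa + pyFact i)

def f (num : Int) : Int := fLoop num 100 0

-- ===== PORT B =====
-- module-level table build: for k in 1..100, TABLE[k] = acc; acc += fact; fact *= k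
def bTable : PySem.Dict Int Int :=
  ((PySem.List.pyRange 1 101 1).foldl
    (fun (st : PySem.Dict Int Int × Int × Int) k =>
      (st.1.insert k st.2.1, st.2.1 + st.2.2, st.2.2 * k))
    (PySem.Dict.empty, 0, 1)).1

-- _TABLE.get(num): returns None outside 1..100 in Python; Pre_ excludes those inputs.
def f_alt (num : Int) : Int := (bTable.get? num).getD 0

-- ===== PRECONDITION & SPEC =====
-- Pre_ excludes inputs outside 1..100, on which Python A returns None, which is not an int.
def Pre_f (num : Int) : Prop := 1 ≤ num ∧ num ≤ 100
instance (num : Int) : Decidable (Pre_f num) := by unfold Pre_f; infer_instance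
def pvWitness_f : Int := 5
def Spec_f (num : Int) (out : Int) : Prop := out = f_alt num
instance (num : Int) (out : Int) : Decidable (Spec_f num out) := by unfold Spec_f; infer_instance

-- ===== CLAIM (what is proved, stated in full; the proofs are below) =====
def Claim_equal_f : Prop := ∀ (num : Int), Dom_f num → Pre_f num → Spec_f num (f num)

-- ===== LEMMAS AND PROOFS =====

-- ===== VERDICT (by name: the statement is the Claim_ definition above) =====
set_option maxRecDepth 100000 in
set_option maxHeartbeats 4000000 in
theorem f_spec : Claim_equal_f := by
  intro num _ hpre
  unfold Spec_f
  obtain ⟨h1, h2⟩ := hpre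
  interval_cases num <;> decide
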